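-- pv_equiv track=rewrite | github.com/Sette/fma_prep | fma_prep/preprocessing/prep.py | group_and_remove_redundant
-- ===== SOURCE A (Python) =====
-- def group_and_remove_redundant(structures):
--     """
--     Group sublists by their size and remove redundant sublists.
--
--     Args:
--         structures (list of lists): A list of lists to process.
--
--     Returns:
--         list of lists: Processed list with no redundant sublists.
--     """
--     # Step 1: Group lists by their size
--     grouped = {}
--     for sublist in structures:
--         size = len(sublist)
--         if size not in grouped:
--             grouped[size] = []
--         grouped[size].append(sublist)
--
--     # Step 2: Sort keys in descending order (largest lists first)
--     sorted_sizes = sorted(grouped.keys(), reverse=True)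
--
--     # Step 3: Remove redundant sublists
--     unique_structures = []
--     seen = set()
--
--     for size in sorted_sizes:
--         for sublist in grouped[size]:
--             # Check if the sublist is already a subset of another added list
--             sublist_set = set(sublist)
--             if not any(sublist_set.issubset(set(added)) for added in unique_structures):
--                 unique_structures.append(sublist)
--
--     return unique_structures
-- ===== SOURCE B (Python) =====
-- def group_and_remove_redundant(structures):
--     # A sublist is kept iff its set is a subset of no list that PRECEDES it in
--     # the length-descending stable order (not just of no kept one): being a
--     # subset of a dropped predecessor implies, by transitivity, being a subset
--     # of the kept predecessor that dropped it.  So each item is judged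
--     # independently against all predecessors, with no greedy kept-state.
--     ordered = sorted(structures, key=len, reverse=True)
--     sets = [set(s) for s in ordered]
--     return [sub for i, sub in enumerate(ordered)
--             if not any(sets[i] <= t for t in sets[:i])]
-- ===== Notes on version B (the rewrite author's own statement) =====
-- stated objective: faster
-- what changed: Replaces the dict bucketing and the greedy fold over a kept-so-far accumulator with one stable length-descending sort, a sets list built once, and a stateless per-item test: a sublist is kept iff its set is a subset of no predecessor at all in that order, which by transitivity of the subset relation yields exactly the greedy result.
import Mathlib
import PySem

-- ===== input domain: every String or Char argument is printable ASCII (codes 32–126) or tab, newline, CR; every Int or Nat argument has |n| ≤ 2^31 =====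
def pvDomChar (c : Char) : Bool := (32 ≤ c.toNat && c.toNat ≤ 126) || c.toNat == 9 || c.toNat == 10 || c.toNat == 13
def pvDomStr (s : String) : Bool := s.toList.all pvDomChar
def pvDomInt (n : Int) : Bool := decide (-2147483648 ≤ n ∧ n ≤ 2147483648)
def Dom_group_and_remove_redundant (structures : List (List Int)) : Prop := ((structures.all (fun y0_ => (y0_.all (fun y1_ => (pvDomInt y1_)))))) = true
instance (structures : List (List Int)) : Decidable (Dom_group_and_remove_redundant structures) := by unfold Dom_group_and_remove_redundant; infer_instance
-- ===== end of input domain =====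

-- B drops A's group-by-size dict and its greedy kept-state entirely: it sorts once
-- (stable, length descending) and keeps each sublist iff its set is a subset of NO
-- predecessor in that order — correct because subset-of-a-dropped-predecessor implies,
-- by transitivity, subset of a kept one (objective: alternative, stateless per-item test).

-- ===== PORT A =====
-- the two lines 'if size not in grouped: grouped[size] = []' and 'grouped[size].append(sublist)'
def pvGroupStep (d : PySem.Dict Int (List (List Int))) (sublist : List Int) : PySem.Dict Int (List (List Int)) :=
  let size : Int := sublist.length
  let d1 := if d.contains size then d else d.insert size []
  d1.insert size (d1.getD size [] ++ [sublist])

-- the body of A's inner loop over a bucket (append unless subset of an added list)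
def pvStepA (unique_structures : List (List Int)) (sublist : List Int) : List (List Int) :=
  if !(unique_structures.any (fun added =>
        PySem.Set.issubset (PySem.Set.ofList sublist) (PySem.Set.ofList added)))
  then unique_structures ++ [sublist]
  else unique_structures

-- (A's 'seen = set()' is never used; not ported)
def group_and_remove_redundant (structures : List (List Int)) : List (List Int) :=
  let grouped := structures.foldl pvGroupStep PySem.Dict.empty
  let sorted_sizes := PySem.List.sorted grouped.keys (fun k => k) true
  sorted_sizes.foldl (fun unique_structures size =>
    (grouped.getD size []).foldl pvStepA unique_structures) []

-- ===== PORT B =====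
-- ordered = sorted(...); sets = [set(s) for s in ordered];
-- [sub for i, sub in enumerate(ordered) if not any(sets[i] <= t for t in sets[:i])]
def group_and_remove_redundant_alt (structures : List (List Int)) : List (List Int) :=
  let ordered := PySem.List.sorted structures (fun s => (s.length : Int)) true
  let sets := ordered.map PySem.Set.ofList
  ((PySem.List.enumerate ordered 0).filter (fun p =>
      !((PySem.List.slice sets none (some p.1)).any (fun t =>
          PySem.Set.issubset (PySem.List.pyGetD sets p.1 (PySem.Set.ofList [])) t)))).map (·.2)

-- ===== PRECONDITION & SPEC =====
def Spec_group_and_remove_redundant (structures : List (List Int)) (out : List (List Int)) : Prop := out = group_and_remove_redundant_alt structures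
instance (structures : List (List Int)) (out : List (List Int)) : Decidable (Spec_group_and_remove_redundant structures out) := by unfold Spec_group_and_remove_redundant; infer_instance

-- ===== CLAIM (what is proved, stated in full; the proofs are below) =====
def Claim_equal_group_and_remove_redundant : Prop := ∀ (structures : List (List Int)), Dom_group_and_remove_redundant structures → Spec_group_and_remove_redundant structures (group_and_remove_redundant structures)

-- ===== LEMMAS AND PROOFS =====

def pvKey (s : List Int) : Int := s.length

def pvModStep (d : PySem.Dict Int (List (List Int))) (x : List Int) : PySem.Dict Int (List (List Int)) :=
  d.modify (pvKey x) [] (· ++ [x])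

lemma pvGroupStep_eq (d : PySem.Dict Int (List (List Int))) (x : List Int) :
    pvGroupStep d x = pvModStep d x := by
  unfold pvGroupStep pvModStep pvKey
  by_cases h : d.contains (x.length : Int) = true
  · simp [h, PySem.Dict.modify]
  · have h2 : d.get? (x.length : Int) = none := by
      have hc := PySem.Dict.contains_eq_isSome_get? d (x.length : Int)
      rw [Bool.not_eq_true] at h
      rw [h] at hc
      cases hg : d.get? (x.length : Int) with
      | none => rfl
      | some v => rw [hg] at hc; simp at hc
    have h0 : d.getD (x.length : Int) [] = [] := by simp [PySem.Dict.getD, h2]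
    rw [Bool.not_eq_true] at h
    simp [h, PySem.Dict.modify, PySem.Dict.getD_insert_self, PySem.Dict.insert_insert_self, h0]

-- getD of the grouping fold is the filter of the input by key
lemma pv_grp_getD (xs : List (List Int)) : ∀ (d : PySem.Dict Int (List (List Int))) (j : Int),
    (xs.foldl pvModStep d).getD j [] = d.getD j [] ++ xs.filter (fun s => pvKey s == j) := by
  induction xs with
  | nil => intro d j; simp
  | cons x xs ih =>
      intro d j
      rw [List.foldl_cons, ih, List.filter_cons]
      by_cases h : pvKey x = j
      · subst h
        have := PySem.Dict.getD_modify_self d (pvKey x) ([] : List (List Int)) (· ++ [x])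
        simp only [pvModStep, this]
        simp
      · have := PySem.Dict.getD_modify_of_ne d ([] : List (List Int)) (k := pvKey x) (k' := j) (· ++ [x]) (fun hh => h hh.symm)
        simp only [pvModStep, this]
        simp [h]

-- keys of the grouping fold are the first-occurrence sizes
lemma pv_grp_keys (xs : List (List Int)) :
    (xs.foldl pvModStep PySem.Dict.empty).keys = PySem.Set.ofList (xs.map pvKey) := by
  have h := PySem.Dict.keys_foldl_modify_key xs pvKey ([] : List (List Int))
      (fun _ x => (· ++ [x])) PySem.Dict.empty
  simpa [pvModStep, PySem.Dict.keys_empty, PySem.Set.update_nil_left] using h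

-- nested foldl = foldl over the flattened buckets
lemma pv_foldl_nested {α β : Type} (L : List β) (g : β → List α) (f : List (List Int) → α → List (List Int)) :
    ∀ (init : List (List Int)),
    L.foldl (fun u k => (g k).foldl f u) init = (L.flatMap g).foldl f init := by
  induction L with
  | nil => intro init; simp
  | cons b L ih => intro init; simp [List.foldl_append, ih]

-- insertBy passes over a prefix it does not insert before
lemma pv_insertBy_append {α : Type} (bef : α → α → Bool) (x : α) (as bs : List α)
    (h : ∀ y ∈ as, bef x y = false) :
    PySem.List.insertBy bef x (as ++ bs) = as ++ PySem.List.insertBy bef x bs := by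
  induction as with
  | nil => simp
  | cons a as ih =>
      simp only [List.cons_append, PySem.List.insertBy]
      rw [h a (by simp)]
      simp [ih (fun y hy => h y (by simp [hy]))]

-- insertBy lands exactly between a ≥-prefix and a <-suffix
lemma pv_insertBy_pos {α : Type} (bef : α → α → Bool) (x : α) (as bs : List α)
    (ha : ∀ y ∈ as, bef x y = false) (hb : ∀ y ∈ bs, bef x y = true) :
    PySem.List.insertBy bef x (as ++ bs) = as ++ x :: bs := by
  rw [pv_insertBy_append bef x as bs ha]
  cases bs with
  | nil => simp [PySem.List.insertBy]
  | cons b bs => simp [PySem.List.insertBy, hb b (by simp)]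

lemma pv_flatMap_congr {α β : Type} (L : List α) (f g : α → List β)
    (h : ∀ a ∈ L, f a = g a) : L.flatMap f = L.flatMap g := by
  induction L with
  | nil => rfl
  | cons a L ih => simp [List.flatMap_cons, h a (by simp), ih (fun a ha => h a (by simp [ha]))]

-- G1: inserting x whose key k already occurs in the strictly descending key list L
lemma pv_G1 (x : List Int) (F : Int → List (List Int)) :
    ∀ (L : List Int), L.Pairwise (fun a b => b < a) →
    (∀ j ∈ L, ∀ s ∈ F j, pvKey s = j) → pvKey x ∈ L →
    PySem.List.insertBy (fun a b => decide (pvKey b < pvKey a)) x (L.flatMap F)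
      = L.flatMap (fun j => if j = pvKey x then F j ++ [x] else F j) := by
  intro L
  induction L with
  | nil => intro _ _ hk; simp at hk
  | cons j L ih =>
      intro hp hF hk
      rw [List.flatMap_cons, List.flatMap_cons]
      have hpj : ∀ b ∈ L, b < j := fun b hb => (List.pairwise_cons.mp hp).1 b hb
      by_cases hj : j = pvKey x
      · have ha : ∀ y ∈ F j, (fun a b => decide (pvKey b < pvKey a)) x y = false := by
          intro y hy
          have h1 := hF j (by simp) y hy
          simp [h1, hj]
        have hb : ∀ y ∈ L.flatMap F, (fun a b => decide (pvKey b < pvKey a)) x y = true := by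
          intro y hy
          obtain ⟨j', hj', hyF⟩ := List.mem_flatMap.mp hy
          have h1 := hF j' (by simp [hj']) y hyF
          have h2 := hpj j' hj'
          simp [h1]
          omega
        rw [pv_insertBy_pos _ x (F j) (L.flatMap F) ha hb]
        have hLne : ∀ j' ∈ L, ¬ (j' = pvKey x) := by
          intro j' hj' hh
          have h2 := hpj j' hj'
          omega
        rw [pv_flatMap_congr L (fun j' => if j' = pvKey x then F j' ++ [x] else F j')
            F (fun j' hj' => by simp [hLne j' hj'])]
        simp [hj]
      · have hkL : pvKey x ∈ L := by
          rcases List.mem_cons.mp hk with hh | hh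
          · exact absurd hh.symm hj
          · exact hh
        have hgt : pvKey x < j := hpj _ hkL
        have ha : ∀ y ∈ F j, (fun a b => decide (pvKey b < pvKey a)) x y = false := by
          intro y hy
          have := hF j (by simp) y hy
          simp [this]
          omega
        rw [pv_insertBy_append _ x (F j) (L.flatMap F) ha]
        rw [ih (List.pairwise_cons.mp hp).2 (fun j' hj' => hF j' (by simp [hj'])) hkL]
        simp [hj]

-- G2: inserting x whose key k is new
lemma pv_G2 (x : List Int) (F : Int → List (List Int)) :
    ∀ (L : List Int), L.Pairwise (fun a b => b < a) →
    (∀ j ∈ L, ∀ s ∈ F j, pvKey s = j) → pvKey x ∉ L →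
    PySem.List.insertBy (fun a b => decide (pvKey b < pvKey a)) x (L.flatMap F)
      = (PySem.List.insertBy (fun a b => decide (b < a)) (pvKey x) L).flatMap
          (fun j => if j = pvKey x then [x] else F j) := by
  intro L
  induction L with
  | nil => intro _ _ _; simp [PySem.List.insertBy]
  | cons j L ih =>
      intro hp hF hk
      have hpj : ∀ b ∈ L, b < j := fun b hb => (List.pairwise_cons.mp hp).1 b hb
      have hjk : ¬ (j = pvKey x) := fun hh => hk (by simp [hh])
      have hkL : pvKey x ∉ L := fun hh => hk (by simp [hh])
      simp only [PySem.List.insertBy, List.flatMap_cons]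
      by_cases hlt : j < pvKey x
      · have hb : ∀ y ∈ F j ++ L.flatMap F, (fun a b => decide (pvKey b < pvKey a)) x y = true := by
          intro y hy
          rcases List.mem_append.mp hy with hy | hy
          · have := hF j (by simp) y hy
            simp [this, hlt]
          · obtain ⟨j', hj', hyF⟩ := List.mem_flatMap.mp hy
            have h1 := hF j' (by simp [hj']) y hyF
            have h2 := hpj j' hj'
            simp [h1]
            omega
        have := pv_insertBy_pos (fun a b => decide (pvKey b < pvKey a)) x []
            (F j ++ L.flatMap F) (by simp) hb
        simp only [List.nil_append] at this
        rw [this]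
        simp only [decide_eq_true_eq, if_pos hlt, List.flatMap_cons, if_neg hjk]
        have hLne : ∀ j' ∈ L, ¬ (j' = pvKey x) := fun j' hj' hh => hkL (hh ▸ hj')
        rw [pv_flatMap_congr L (fun j' => if j' = pvKey x then [x] else F j')
            F (fun j' hj' => by simp [hLne j' hj'])]
        simp
      · have hgt : pvKey x < j := by
          rcases lt_trichotomy j (pvKey x) with h | h | h
          · exact absurd h hlt
          · exact absurd h hjk
          · exact h
        have ha : ∀ y ∈ F j, (fun a b => decide (pvKey b < pvKey a)) x y = false := by
          intro y hy
          have := hF j (by simp) y hy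
          simp [this]
          omega
        rw [pv_insertBy_append _ x (F j) (L.flatMap F) ha]
        rw [ih (List.pairwise_cons.mp hp).2 (fun j' hj' => hF j' (by simp [hj'])) hkL]
        simp only [decide_eq_true_eq, if_neg hlt, List.flatMap_cons, if_neg hjk]

lemma pv_sorted_snoc {α κ : Type} [LinearOrder κ] (xs : List α) (x : α) (key : α → κ) :
    PySem.List.sorted (xs ++ [x]) key true
      = PySem.List.insertBy (fun a b => decide (key b < key a)) x (PySem.List.sorted xs key true) := by
  rw [PySem.List.sorted_rev_eq_foldl_insertBy, PySem.List.sorted_rev_eq_foldl_insertBy, List.foldl_append]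
  rfl

lemma pv_sorted_desc_strict (K : List Int) (h : K.Nodup) :
    (PySem.List.sorted K (fun j => j) true).Pairwise (fun a b => b < a) := by
  have h1 := PySem.List.sorted_pairwise_rev K (fun j => j)
  have h2 : (PySem.List.sorted K (fun j => j) true).Nodup :=
    (PySem.List.sorted_perm K (fun j => j) true).nodup_iff.mpr h
  have := h1.and h2
  exact this.imp (fun {a b} hab => lt_of_le_of_ne hab.1 (Ne.symm hab.2))

lemma pv_ofList_snoc {α : Type} [BEq α] (l : List α) (k : α) :
    PySem.Set.ofList (l ++ [k]) = PySem.Set.add (PySem.Set.ofList l) k := by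
  rw [PySem.Set.ofList_eq_foldl, PySem.Set.ofList_eq_foldl, List.foldl_append]
  rfl

-- MAIN (A side): the flattened descending buckets are exactly the stable reverse sort
lemma pv_main (xs : List (List Int)) :
    (PySem.List.sorted (PySem.Set.ofList (xs.map pvKey)) (fun j => j) true).flatMap
        (fun j => xs.filter (fun s => pvKey s == j))
      = PySem.List.sorted xs pvKey true := by
  induction xs using List.reverseRecOn with
  | nil => rfl
  | append_singleton xs x ih =>
      have hmap : (xs ++ [x]).map pvKey = xs.map pvKey ++ [pvKey x] := by simp
      rw [hmap, pv_ofList_snoc, pv_sorted_snoc xs x pvKey]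
      have hnodup : (PySem.Set.ofList (xs.map pvKey)).Nodup := PySem.Set.nodup_ofList _
      have hdesc := pv_sorted_desc_strict (PySem.Set.ofList (xs.map pvKey)) hnodup
      have hF : ∀ j ∈ PySem.List.sorted (PySem.Set.ofList (xs.map pvKey)) (fun j => j) true,
          ∀ s ∈ xs.filter (fun s => pvKey s == j), pvKey s = j := by
        intro j _ s hs
        simpa using List.of_mem_filter hs
      by_cases hk : pvKey x ∈ xs.map pvKey
      · have hkK : PySem.Set.add (PySem.Set.ofList (xs.map pvKey)) (pvKey x)
            = PySem.Set.ofList (xs.map pvKey) := by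
          have hmem : pvKey x ∈ PySem.Set.ofList (xs.map pvKey) := (PySem.Set.mem_ofList _ _).mpr hk
          have hc : (PySem.Set.ofList (xs.map pvKey)).contains (pvKey x) = true := by
            simpa [PySem.Set.contains] using hmem
          simp only [PySem.Set.add, hc, if_true]
        rw [hkK, ← ih]
        have hmemL : pvKey x ∈ PySem.List.sorted (PySem.Set.ofList (xs.map pvKey)) (fun j => j) true :=
          (PySem.List.mem_sorted _ _ _ _).mpr ((PySem.Set.mem_ofList _ _).mpr hk)
        rw [pv_G1 x (fun j => xs.filter (fun s => pvKey s == j)) _ hdesc hF hmemL]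
        apply pv_flatMap_congr
        intro j hj
        rw [List.filter_append]
        by_cases hj' : j = pvKey x
        · subst hj'
          simp
        · have : ¬ (pvKey x = j) := fun hh => hj' hh.symm
          simp [this, hj']
      · have hkK : PySem.Set.add (PySem.Set.ofList (xs.map pvKey)) (pvKey x)
            = PySem.Set.ofList (xs.map pvKey) ++ [pvKey x] := by
          have hmem : pvKey x ∉ PySem.Set.ofList (xs.map pvKey) := by
            rw [PySem.Set.mem_ofList]; exact hk
          have hc : (PySem.Set.ofList (xs.map pvKey)).contains (pvKey x) = false := by
            rw [← Bool.not_eq_true]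
            simpa [PySem.Set.contains] using hmem
          simp only [PySem.Set.add, hc, Bool.false_eq_true, if_false]
        rw [hkK]
        have hsortK : PySem.List.sorted (PySem.Set.ofList (xs.map pvKey) ++ [pvKey x]) (fun j => j) true
            = PySem.List.insertBy (fun a b => decide (b < a)) (pvKey x)
                (PySem.List.sorted (PySem.Set.ofList (xs.map pvKey)) (fun j => j) true) :=
          pv_sorted_snoc _ _ _
        rw [hsortK, ← ih]
        have hmemL : pvKey x ∉ PySem.List.sorted (PySem.Set.ofList (xs.map pvKey)) (fun j => j) true := by
          rw [PySem.List.mem_sorted, PySem.Set.mem_ofList]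
          exact hk
        rw [pv_G2 x (fun j => xs.filter (fun s => pvKey s == j)) _ hdesc hF hmemL]
        apply pv_flatMap_congr
        intro j hj
        rcases (PySem.List.mem_insertBy _ _ _ _).mp hj with heq | hjL
        · have hnil : xs.filter (fun s => pvKey s == j) = [] := by
            rw [List.filter_eq_nil_iff]
            intro s hs
            simp only [beq_iff_eq]
            intro hh
            exact hk (List.mem_map.mpr ⟨s, hs, hh.trans heq⟩)
          rw [List.filter_append, hnil]
          simp [heq]
        · have hne : ¬ (j = pvKey x) := fun hh => hmemL (hh ▸ hjL)
          have hne' : ¬ (pvKey x = j) := fun hh => hne hh.symm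
          rw [List.filter_append]
          simp [hne, hne']

-- ===== B-side lemmas: greedy kept-state = stateless all-predecessors test =====

-- 'set x is a subset of set a'
def pvRb (x a : List Int) : Bool :=
  PySem.Set.issubset (PySem.Set.ofList x) (PySem.Set.ofList a)

-- the stateless pass: keep x iff no PREDECESSOR (kept or not) has a superset set
def pvPf (seen xs : List (List Int)) : List (List Int) :=
  match xs with
  | [] => []
  | x :: xs =>
      if seen.any (pvRb x) then pvPf (seen ++ [x]) xs
      else x :: pvPf (seen ++ [x]) xs

lemma pv_issubset_trans (s t u : PySem.Set Int)
    (h1 : PySem.Set.issubset s t = true) (h2 : PySem.Set.issubset t u = true) :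
    PySem.Set.issubset s u = true := by
  rw [PySem.Set.issubset_iff] at *
  exact fun x hx => h2 x (h1 x hx)

-- A's greedy fold (testing against kept only) computes the stateless pass
lemma pv_greedy_pf : ∀ (xs seen acc : List (List Int)),
    (∀ z, acc.any (pvRb z) = seen.any (pvRb z)) →
    xs.foldl pvStepA acc = acc ++ pvPf seen xs := by
  intro xs
  induction xs with
  | nil => intro seen acc _; simp [pvPf]
  | cons x xs ih =>
      intro seen acc H
      have hstep : pvStepA acc x = if acc.any (pvRb x) then acc else acc ++ [x] := by
        have he : acc.any (pvRb x)
            = acc.any (fun added => PySem.Set.issubset (PySem.Set.ofList x) (PySem.Set.ofList added)) := rfl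
        rw [he]
        unfold pvStepA
        cases h : acc.any (fun added => PySem.Set.issubset (PySem.Set.ofList x) (PySem.Set.ofList added)) <;> simp
      rw [List.foldl_cons, hstep]
      by_cases h : seen.any (pvRb x) = true
      · have h' : acc.any (pvRb x) = true := (H x).trans h
        rw [if_pos h']
        have H' : ∀ z, acc.any (pvRb z) = (seen ++ [x]).any (pvRb z) := by
          intro z
          rw [List.any_append]
          by_cases hz : pvRb z x = true
          · obtain ⟨a, ha, hxa⟩ := List.any_eq_true.mp h'
            have hza : pvRb z a = true :=
              pv_issubset_trans _ _ _ hz hxa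
            have : acc.any (pvRb z) = true := List.any_eq_true.mpr ⟨a, ha, hza⟩
            simp [this, hz]
          · simp only [Bool.not_eq_true] at hz
            simp [hz, H z]
        rw [ih (seen ++ [x]) acc H']
        simp [pvPf, h]
      · have h' : acc.any (pvRb x) = false := (H x).trans (Bool.not_eq_true _ ▸ h)
        rw [if_neg (by simp [h'])]
        have H' : ∀ z, (acc ++ [x]).any (pvRb z) = (seen ++ [x]).any (pvRb z) := by
          intro z
          rw [List.any_append, List.any_append, H z]
        rw [ih (seen ++ [x]) (acc ++ [x]) H']
        simp [pvPf, h]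

-- the stateless pass as a filter of the enumerated suffix against prefixes of L
lemma pv_pf_enum (L : List (List Int)) : ∀ (xs pre : List (List Int)), pre ++ xs = L →
    pvPf pre xs = ((PySem.List.enumerate xs (pre.length : Int)).filter
        (fun p => !((L.take p.1.toNat).any (pvRb p.2)))).map (·.2) := by
  intro xs
  induction xs with
  | nil => intro pre _; simp [pvPf, PySem.List.enumerate]
  | cons x xs ih =>
      intro pre hL
      have htake : L.take ((pre.length : Int)).toNat = pre := by
        rw [← hL]
        simp
      have hlen : (pre.length : Int) + 1 = ((pre ++ [x]).length : Int) := by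
        simp
      rw [PySem.List.enumerate_cons, List.filter_cons, hlen]
      unfold pvPf
      rw [ih (pre ++ [x]) (by simpa using hL)]
      have htake' : L.take pre.length = pre := by simpa using htake
      by_cases h : pre.any (pvRb x) = true
      · rw [if_pos h, if_neg (by simp [htake', h])]
      · rw [if_neg h, if_pos (by simp [htake']; simpa using h)]
        simp

-- B's port, with slice/pyGetD/map resolved, is the enumerate-filter of pv_pf_enum
lemma pv_alt_eq (structures : List (List Int)) :
    group_and_remove_redundant_alt structures
      = ((PySem.List.enumerate (PySem.List.sorted structures pvKey true) 0).filter
          (fun p => !(((PySem.List.sorted structures pvKey true).take p.1.toNat).any (pvRb p.2)))).map (·.2) := by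
  unfold group_and_remove_redundant_alt
  rw [show (fun s : List Int => (s.length : Int)) = pvKey from rfl]
  simp only []
  congr 1
  apply List.filter_congr
  intro p hp
  obtain ⟨k, hk, hpk⟩ := (PySem.List.mem_enumerate_iff _ _ _).mp hp
  subst hpk
  simp only [zero_add]
  set L := PySem.List.sorted structures pvKey true with hLdef
  have hslice : PySem.List.slice (L.map PySem.Set.ofList) none (some (k : Int))
      = (L.map PySem.Set.ofList).take k := by
    rw [PySem.List.slice_to _ (Int.natCast_nonneg k)]
    simp
  have hget : PySem.List.pyGetD (L.map PySem.Set.ofList) (k : Int) (PySem.Set.ofList [])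
      = PySem.Set.ofList L[k] := by
    rw [PySem.List.pyGetD_eq_getElem _ _ (Int.natCast_nonneg k) (by simpa using hk)]
    simp
  rw [hslice, hget, ← List.map_take, List.any_map]
  rfl

-- ===== VERDICT (by name: the statement is the Claim_ definition above) =====
theorem group_and_remove_redundant_spec : Claim_equal_group_and_remove_redundant := by
  intro structures _
  unfold Spec_group_and_remove_redundant group_and_remove_redundant
  rw [pv_alt_eq]
  have hstep : pvGroupStep = pvModStep := funext₂ pvGroupStep_eq
  simp only [hstep]
  rw [pv_foldl_nested]
  have hkeys := pv_grp_keys structures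
  have hbuckets : ((PySem.List.sorted (structures.foldl pvModStep PySem.Dict.empty).keys (fun k => k) true).flatMap
        (fun size => (structures.foldl pvModStep PySem.Dict.empty).getD size []))
      = PySem.List.sorted structures pvKey true := by
    rw [hkeys]
    rw [pv_flatMap_congr _ _ (fun j => structures.filter (fun s => pvKey s == j))
        (fun j _ => by rw [pv_grp_getD]; rfl)]
    exact pv_main structures
  rw [hbuckets]
  rw [pv_greedy_pf (PySem.List.sorted structures pvKey true) [] [] (fun z => rfl)]
  rw [pv_pf_enum (PySem.List.sorted structures pvKey true) (PySem.List.sorted structures pvKey true) [] rfl]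
  simp
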